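-- pv_equiv track=rewrite | github.com/markuspf/jupyter-kernel-gap | jupyter_kernel_gap/kernel.py | _sep_response
-- ===== SOURCE A (Python) =====
-- def _sep_response(string):
--     # not the safest way of doing this
--     jsonl = string.find('{')
--     jsonr = string.rfind('}')
--
--     # This can now contain more than one json dict.
--     # I will punt fixing this until after I move to
--     # direct ZMQ or libgap
--     res_json = string[jsonl:jsonr+1].split("}{")
--     if len(res_json) > 1:
--         res_json[0] = res_json[0] + '}'
--         for i in range(1,len(res_json)-1):
--             res_json[i] = '{' + res_json[i] + '}'
--         res_json[-1] = '{' + res_json[-1]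
--     res_rest = string[:jsonl] + string[jsonr+1:]
--
--     return (res_json,res_rest)
-- ===== SOURCE B (Python) =====
-- def _sep_response(string):
--     # Same find/rfind/slice framing as the original; the split-then-patch
--     # block is replaced by one left-to-right scan that emits the brace-delimited
--     # pieces directly, so no index loop and no re-adding of braces is needed.
--     jsonl = string.find('{')
--     jsonr = string.rfind('}')
--     core = string[jsonl:jsonr+1]
--     pieces = []
--     buf = []
--     prev = None
--     for ch in core:
--         if ch == '{' and prev == '}':
--             pieces.append(''.join(buf))
--             buf = []
--         buf.append(ch)
--         prev = ch
--     pieces.append(''.join(buf))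
--     return (pieces, string[:jsonl] + string[jsonr+1:])
-- ===== Notes on version B (the rewrite author's own statement) =====
-- stated objective: idiomatic
-- what changed: The split on the adjacent close-open brace pair followed by an index loop that re-adds the stripped braces is replaced by a single left-to-right scan of the core that emits the brace-delimited pieces directly (break before an opening brace whenever the previous char was a closing one), with no patch loop and no length guard.
import Mathlib
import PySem

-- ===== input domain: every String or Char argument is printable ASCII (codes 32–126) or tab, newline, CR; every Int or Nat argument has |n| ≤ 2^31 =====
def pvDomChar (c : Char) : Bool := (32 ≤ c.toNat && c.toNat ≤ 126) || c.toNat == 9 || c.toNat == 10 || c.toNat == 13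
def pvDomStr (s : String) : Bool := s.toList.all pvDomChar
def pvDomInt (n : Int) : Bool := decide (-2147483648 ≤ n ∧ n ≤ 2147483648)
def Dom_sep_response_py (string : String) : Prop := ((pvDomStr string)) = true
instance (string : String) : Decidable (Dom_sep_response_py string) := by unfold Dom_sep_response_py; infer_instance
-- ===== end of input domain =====

-- B replaces A's split-on-the-brace-pair-then-patch-braces block by one direct left-to-right scan
-- that emits the brace-delimited pieces; equality of the return values is proved for all strings.

-- ===== PORT A =====
-- body of A's 'for i in range(1, len(res_json)-1)' loop: res_json[i] = '{' + res_json[i] + '}'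
def sepPatchStep (acc : List (List Char)) (i : Int) : List (List Char) :=
  acc.set i.toNat ('{' :: (acc.getD i.toNat [] ++ ['}']))

-- A's 'if len(res_json) > 1: …' patch block
def sepPatch (res_json : List (List Char)) : List (List Char) :=
  if 1 < res_json.length then
    let r1 := res_json.set 0 (res_json.getD 0 [] ++ ['}'])
    let r2 := (PySem.List.pyRange 1 ((r1.length : Int) - 1) 1).foldl sepPatchStep r1
    r2.set (r2.length - 1) ('{' :: r2.getD (r2.length - 1) [])
  else res_json

def sep_response_py (string : String) : List String × String :=
  let s := string.toList
  let jsonl : Int := PySem.Chars.find s ['{']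
  let jsonr : Int := PySem.Chars.rfind s ['}']
  let res_json := sepPatch (PySem.Chars.splitOn (PySem.Chars.slice s (some jsonl) (some (jsonr + 1))) ['}', '{'])
  let res_rest := PySem.Chars.slice s none (some jsonl) ++ PySem.Chars.slice s (some (jsonr + 1)) none
  (res_json.map String.ofList, String.ofList res_rest)

-- ===== PORT B =====
-- body of B's scan loop over (pieces, buf, prev)
def sepScanStep (st : List (List Char) × List Char × Option Char) (ch : Char) :
    List (List Char) × List Char × Option Char :=
  if ch = '{' ∧ st.2.2 = some '}' then (st.1 ++ [st.2.1], [ch], some ch)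
  else (st.1, st.2.1 ++ [ch], some ch)

def sep_response_py_alt (string : String) : List String × String :=
  let s := string.toList
  let jsonl : Int := PySem.Chars.find s ['{']
  let jsonr : Int := PySem.Chars.rfind s ['}']
  let core := PySem.Chars.slice s (some jsonl) (some (jsonr + 1))
  let st := core.foldl sepScanStep ([], [], none)
  let pieces := st.1 ++ [st.2.1]
  let res_rest := PySem.Chars.slice s none (some jsonl) ++ PySem.Chars.slice s (some (jsonr + 1)) none
  (pieces.map String.ofList, String.ofList res_rest)

-- ===== PRECONDITION & SPEC =====
def Spec_sep_response_py (string : String) (out : List String × String) : Prop := out = sep_response_py_alt string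
instance (string : String) (out : List String × String) : Decidable (Spec_sep_response_py string out) := by unfold Spec_sep_response_py; infer_instance

-- ===== CLAIM (what is proved, stated in full; the proofs are below) =====
def Claim_equal_sep_response_py : Prop := ∀ (string : String), Dom_sep_response_py string → Spec_sep_response_py string (sep_response_py string)

-- ===== LEMMAS AND PROOFS =====

-- prepend a piece onto the head of a piece list
def consHL (p : List Char) : List (List Char) → List (List Char)
  | [] => [p]
  | h :: t => (p ++ h) :: t

-- what A's separator split computes, recursively
def sb : List Char → List (List Char)
  | [] => [[]]
  | [c] => [[c]]
  | c :: d :: rest =>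
    if c = '}' ∧ d = '{' then [] :: sb rest
    else consHL [c] (sb (d :: rest))

-- what B's scan computes after a previous character c
def scP (c : Char) : List Char → List (List Char)
  | [] => [[]]
  | d :: rest =>
    if d = '{' ∧ c = '}' then [] :: consHL [d] (scP d rest)
    else consHL [d] (scP d rest)

def sc : List Char → List (List Char)
  | [] => [[]]
  | c :: rest => consHL [c] (scP c rest)

def wrap (p : List Char) : List Char := '{' :: (p ++ ['}'])

def wrapMid : List (List Char) → List (List Char)
  | [] => []
  | [p] => ['{' :: p]
  | p :: ps => ('{' :: (p ++ ['}'])) :: wrapMid ps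

def patchC : List (List Char) → List (List Char)
  | [] => []
  | [p] => [p]
  | p :: ps => (p ++ ['}']) :: wrapMid ps

theorem consHL_consHL (a b : List Char) (x : List (List Char)) :
    consHL a (consHL b x) = consHL (a ++ b) x := by
  cases x <;> simp [consHL]

theorem sb_ne_nil (l : List Char) : sb l ≠ [] := by
  induction l using sb.induct with
  | case1 => simp [sb]
  | case2 c => simp [sb]
  | case3 c d rest h ih => simp [sb, h]
  | case4 c d rest h ih =>
    simp only [sb, if_neg h]
    cases hs : sb (d :: rest) <;> simp [consHL]

theorem scP_nobreak (c : Char) (hc : c ≠ '}') (l : List Char) : scP c l = sc l := by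
  cases l with
  | nil => simp [scP, sc]
  | cons d rest => simp [scP, sc, hc]

theorem patchC_cons (p : List Char) (ps : List (List Char)) (h : ps ≠ []) :
    patchC (p :: ps) = (p ++ ['}']) :: wrapMid ps := by
  cases ps with
  | nil => exact absurd rfl h
  | cons q t => simp [patchC]

theorem patchC_consHL (c : Char) (ps : List (List Char)) :
    patchC (consHL [c] ps) = consHL [c] (patchC ps) := by
  match ps with
  | [] => simp [consHL, patchC]
  | [p] => simp [consHL, patchC]
  | p :: q :: ps' => simp [consHL, patchC]

theorem wrapMid_eq (ps : List (List Char)) (h : ps ≠ []) :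
    wrapMid ps = consHL ['{'] (patchC ps) := by
  match ps with
  | [p] => simp [wrapMid, patchC, consHL]
  | p :: q :: ps' => simp [wrapMid, patchC, consHL]

-- A's patched split equals B's scan
theorem patchC_sb (l : List Char) : patchC (sb l) = sc l := by
  induction l using sb.induct with
  | case1 => simp [sb, sc, patchC]
  | case2 c => simp [sb, sc, patchC, scP, consHL]
  | case3 c d rest h ih =>
    obtain ⟨hc, hd⟩ := h
    subst hc; subst hd
    have hscp : scP '{' rest = sc rest := scP_nobreak '{' (by decide) rest
    have h2 : patchC ([] :: sb rest) = ['}'] :: wrapMid (sb rest) := by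
      cases hs : sb rest with
      | nil => exact absurd hs (sb_ne_nil rest)
      | cons a t => cases t <;> simp [patchC, wrapMid]
    rw [sb, if_pos ⟨rfl, rfl⟩, h2, wrapMid_eq (sb rest) (sb_ne_nil rest), ih, ← hscp]
    rw [sc]
    have h3 : scP '}' ('{' :: rest) = [] :: consHL ['{'] (scP '{' rest) := by
      rw [scP]; simp
    rw [h3]
    simp [consHL]
  | case4 c d rest h ih =>
    rw [sb, if_neg h, patchC_consHL, ih, sc, sc]
    have h4 : scP c (d :: rest) = consHL [d] (scP d rest) := by
      rw [scP, if_neg (by tauto)]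
    rw [h4]

-- ===== relating B's foldl to scP =====

theorem scan_go (l : List Char) : ∀ (P : List (List Char)) (buf : List Char) (c : Char),
    (l.foldl sepScanStep (P, buf, some c)).1 ++ [(l.foldl sepScanStep (P, buf, some c)).2.1]
      = P ++ consHL buf (scP c l) := by
  induction l with
  | nil => intro P buf c; simp [scP, consHL]
  | cons d rest ih =>
    intro P buf c
    by_cases h : d = '{' ∧ c = '}'
    · obtain ⟨hd, hc⟩ := h
      subst hd; subst hc
      have hF : sepScanStep (P, buf, some '}') '{' = (P ++ [buf], ['{'], some '{') := by
        simp [sepScanStep]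
      simp only [List.foldl_cons, hF, ih]
      have h3 : scP '}' ('{' :: rest) = [] :: consHL ['{'] (scP '{' rest) := by
        rw [scP]; simp
      rw [h3]
      simp [consHL]
    · have hF : sepScanStep (P, buf, some c) d = (P, buf ++ [d], some d) := by
        simp only [sepScanStep]
        rw [if_neg (by simpa using h)]
      simp only [List.foldl_cons, hF, ih]
      rw [scP, if_neg h, consHL_consHL]

theorem scan_eq_sc (l : List Char) :
    (l.foldl sepScanStep ([], [], none)).1 ++ [(l.foldl sepScanStep ([], [], none)).2.1] = sc l := by
  cases l with
  | nil => simp [sc]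
  | cons c rest =>
    have hF : sepScanStep ([], [], none) c = ([], [c], some c) := by
      simp [sepScanStep]
    simp only [List.foldl_cons, hF, scan_go rest [] [c] c]
    simp [sc]

-- ===== relating A's patch loop to patchC =====

def wrapFold (r : List (List Char)) (a b : Int) : List (List Char) :=
  (PySem.List.pyRange a b 1).foldl sepPatchStep r

theorem wrapFold_shift (n : ℕ) : ∀ (a b : Int), 1 ≤ a → (b - a).toNat = n →
    ∀ (hd : List Char) (t : List (List Char)),
      wrapFold (hd :: t) a b = hd :: wrapFold t (a - 1) (b - 1) := by
  induction n with
  | zero =>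
    intro a b ha hn hd t
    unfold wrapFold
    rw [PySem.List.pyRange_one_eq_nil (by omega), PySem.List.pyRange_one_eq_nil (by omega)]
    simp
  | succ k ih =>
    intro a b ha hn hd t
    have hab : a < b := by omega
    rw [show wrapFold (hd :: t) a b = wrapFold (sepPatchStep (hd :: t) a) (a + 1) b from by
      unfold wrapFold; rw [PySem.List.pyRange_one_cons hab, List.foldl_cons]]
    have ha' : a.toNat = (a - 1).toNat + 1 := by omega
    have hstep : sepPatchStep (hd :: t) a = hd :: sepPatchStep t (a - 1) := by
      unfold sepPatchStep
      rw [ha']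
      simp
    rw [hstep, ih (a + 1) b (by omega) (by omega)]
    rw [show wrapFold t (a - 1) (b - 1) = wrapFold (sepPatchStep t (a - 1)) (a - 1 + 1) (b - 1) from by
      unfold wrapFold; rw [PySem.List.pyRange_one_cons (by omega : a - 1 < b - 1), List.foldl_cons]]
    norm_num

theorem wrapFold_all (t : List (List Char)) : ∀ (b : Int), 0 ≤ b → b.toNat ≤ t.length →
    wrapFold t 0 b = (t.take b.toNat).map wrap ++ t.drop b.toNat := by
  induction t with
  | nil =>
    intro b hb hlen
    have : b = 0 := by simp at hlen; omega
    subst this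
    unfold wrapFold
    rw [PySem.List.pyRange_one_eq_nil (by omega)]
    simp
  | cons h t ih =>
    intro b hb hlen
    by_cases h0 : b = 0
    · subst h0
      unfold wrapFold
      rw [PySem.List.pyRange_one_eq_nil (by omega)]
      simp
    · have hpos : (0 : Int) < b := by omega
      have hlen' : b.toNat ≤ t.length + 1 := by simpa using hlen
      have hstep : sepPatchStep (h :: t) 0 = wrap h :: t := by
        simp [sepPatchStep, wrap]
      have hsh := wrapFold_shift (b - 1).toNat 1 b (by omega) (by omega) (wrap h) t
      rw [show (1 : Int) - 1 = 0 from by norm_num] at hsh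
      have iht := ih (b - 1) (by omega) (by omega : (b - 1).toNat ≤ t.length)
      unfold wrapFold at hsh iht ⊢
      rw [PySem.List.pyRange_one_cons hpos, List.foldl_cons, hstep,
        show (0 : Int) + 1 = 1 from by norm_num, hsh, iht]
      have hbn : b.toNat = (b - 1).toNat + 1 := by omega
      rw [hbn]
      simp

theorem wrapMid_append (front : List (List Char)) (lastp : List Char) :
    wrapMid (front ++ [lastp]) = front.map wrap ++ [('{' :: lastp)] := by
  induction front with
  | nil => simp [wrapMid]
  | cons p front' ih =>
    cases front' with
    | nil => simp [wrapMid, wrap]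
    | cons q front'' =>
      simp only [List.cons_append] at ih ⊢
      rw [wrapMid, ih]
      all_goals simp [wrap]

theorem set_last_append (front : List (List Char)) (lastp v : List Char) :
    (front ++ [lastp]).set front.length v = front ++ [v] := by
  induction front with
  | nil => simp
  | cons p front' ih => simp [ih]

theorem getD_last_append (front : List (List Char)) (lastp : List Char) :
    (front ++ [lastp]).getD front.length [] = lastp := by
  induction front with
  | nil => simp
  | cons p front' _ => simp

-- A's whole patch block equals patchC, for nonempty piece lists
theorem sepPatch_eq_patchC (ps : List (List Char)) (h : ps ≠ []) : sepPatch ps = patchC ps := by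
  match ps with
  | [] => exact absurd rfl h
  | [p] => simp [sepPatch, patchC]
  | p :: q :: t =>
    unfold sepPatch
    rw [if_pos (by simp)]
    simp only [List.set_cons_zero, List.getD_cons_zero, List.length_cons]
    -- decompose q :: t as front ++ [lastp]
    obtain ⟨lastp, hdr⟩ : ∃ lastp, (q :: t).drop t.length = [lastp] := by
      have hlen1 : ((q :: t).drop t.length).length = 1 := by simp
      match hd : (q :: t).drop t.length with
      | [x] => exact ⟨x, rfl⟩
      | [] => rw [hd] at hlen1; simp at hlen1
      | x :: y :: z => rw [hd] at hlen1; simp at hlen1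
    have hqt : q :: t = (q :: t).take t.length ++ [lastp] := by
      rw [← hdr, List.take_append_drop]
    have hfl : ((q :: t).take t.length).length = t.length := by simp
    have hcast : ((t.length + 1 + 1 : ℕ) : Int) - 1 - 1 = ((t.length : ℕ) : Int) := by push_cast; ring
    have h1 : wrapFold ((p ++ ['}']) :: q :: t) 1 (((t.length + 1 + 1 : ℕ) : Int) - 1)
        = (p ++ ['}']) :: wrapFold (q :: t) 0 (((t.length + 1 + 1 : ℕ) : Int) - 1 - 1) :=
      wrapFold_shift t.length 1 _ (by omega) (by push_cast; omega) _ _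
    have h2 : wrapFold (q :: t) 0 (((t.length + 1 + 1 : ℕ) : Int) - 1 - 1)
        = ((q :: t).take t.length).map wrap ++ (q :: t).drop t.length := by
      rw [hcast, wrapFold_all (q :: t) ((t.length : ℕ) : Int) (by omega) (by simp)]
      simp
    have hXfold : (PySem.List.pyRange 1 (((t.length + 1 + 1 : ℕ) : Int) - 1) 1).foldl sepPatchStep
          ((p ++ ['}']) :: q :: t)
        = (p ++ ['}']) :: (((q :: t).take t.length).map wrap ++ [lastp]) := by
      show wrapFold ((p ++ ['}']) :: q :: t) 1 (((t.length + 1 + 1 : ℕ) : Int) - 1)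
        = (p ++ ['}']) :: (((q :: t).take t.length).map wrap ++ [lastp])
      rw [h1, h2, hdr]
    rw [hXfold]
    have hXlen : ((p ++ ['}']) :: (((q :: t).take t.length).map wrap ++ [lastp])).length - 1
        = (((q :: t).take t.length).map wrap).length + 1 := by simp
    rw [hXlen]
    have hgetD : ((p ++ ['}']) :: (((q :: t).take t.length).map wrap ++ [lastp])).getD
        ((((q :: t).take t.length).map wrap).length + 1) [] = lastp := by
      rw [List.getD_cons_succ, getD_last_append]
    have hset : ((p ++ ['}']) :: (((q :: t).take t.length).map wrap ++ [lastp])).set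
        ((((q :: t).take t.length).map wrap).length + 1) ('{' :: lastp)
        = (p ++ ['}']) :: (((q :: t).take t.length).map wrap ++ [('{' :: lastp)]) := by
      rw [List.set_cons_succ, set_last_append]
    rw [hgetD, hset, patchC_cons p (q :: t) (by simp)]
    rw [show wrapMid (q :: t) = wrapMid ((q :: t).take t.length ++ [lastp]) from by rw [← hqt]]
    rw [wrapMid_append]

-- ===== A's splitOn equals sb =====

theorem go_spec (fuel : ℕ) : ∀ (l cur : List Char) (acc : List (List Char)), l.length < fuel →
    PySem.Chars.splitOn.go ['}', '{'] fuel l cur acc = acc.reverse ++ consHL cur.reverse (sb l) := by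
  induction fuel with
  | zero => intro l cur acc h; omega
  | succ f ih =>
    intro l cur acc h
    match l with
    | [] => simp [PySem.Chars.splitOn.go, sb, consHL]
    | c :: rest =>
      rw [PySem.Chars.splitOn.go]
      by_cases hp : List.isPrefixOf ['}', '{'] (c :: rest) = true
      · rw [if_pos hp]
        match rest with
        | [] => simp [List.isPrefixOf] at hp
        | c2 :: rest2 =>
          have hc : '}' = c ∧ '{' = c2 := by simpa [List.isPrefixOf] using hp
          obtain ⟨hc1, hc2⟩ := hc
          subst hc1; subst hc2
          have hlen : rest2.length < f := by simp at h; omega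
          rw [show List.drop (['}', '{'] : List Char).length ('}' :: '{' :: rest2) = rest2 from by simp]
          rw [ih rest2 [] (cur.reverse :: acc) hlen]
          rw [sb, if_pos ⟨rfl, rfl⟩]
          cases hs : sb rest2 with
          | nil => exact absurd hs (sb_ne_nil rest2)
          | cons x xs => simp [consHL]
      · rw [if_neg hp]
        have hlen : rest.length < f := by simp at h; omega
        rw [ih rest (c :: cur) acc hlen]
        have hsb : consHL cur.reverse (sb (c :: rest)) = consHL (cur.reverse ++ [c]) (sb rest) := by
          match rest with
          | [] => simp [sb, consHL]
          | d :: rest' =>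
            have hnb : ¬(c = '}' ∧ d = '{') := by
              intro ⟨h1, h2⟩
              subst h1; subst h2
              simp [List.isPrefixOf] at hp
            rw [sb, if_neg hnb, consHL_consHL]
        rw [hsb]
        simp

theorem splitOn_eq_sb (l : List Char) : PySem.Chars.splitOn l ['}', '{'] = sb l := by
  rw [PySem.Chars.splitOn, go_spec (l.length + 1) l [] [] (by omega)]
  simp only [List.reverse_nil, List.nil_append]
  cases hs : sb l with
  | nil => exact absurd hs (sb_ne_nil l)
  | cons a t => simp [consHL]

-- the two pipelines agree on any character list
theorem pieces_eq (l : List Char) :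
    sepPatch (PySem.Chars.splitOn l ['}', '{'])
      = (l.foldl sepScanStep ([], [], none)).1 ++ [(l.foldl sepScanStep ([], [], none)).2.1] := by
  rw [splitOn_eq_sb, sepPatch_eq_patchC (sb l) (sb_ne_nil l), patchC_sb, scan_eq_sc]

-- ===== VERDICT (by name: the statement is the Claim_ definition above) =====
theorem sep_response_py_spec : Claim_equal_sep_response_py := by
  intro string _
  unfold Spec_sep_response_py sep_response_py sep_response_py_alt
  simp only [pieces_eq]
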